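-- pv_equiv track=rewrite | github.com/toroleapinc/encephagen | experiments/25_scfc_validation.py | classify_regions
-- ===== SOURCE A (Python) =====
-- def classify_regions(labels):
--     groups = {}
--     for key, patterns in [
--         ('visual', ['V1', 'V2', 'VAC']),
--         ('prefrontal', ['PFC', 'FEF']),
--         ('hippocampus', ['HC', 'PHC']),
--         ('amygdala', ['AMYG']),
--         ('thalamus', ['TM']),
--         ('motor', ['M1', 'PMC']),
--     ]:
--         groups[key] = [i for i, l in enumerate(labels)
--                        if any(p in l.upper() for p in patterns)]
--     return groups
-- ===== SOURCE B (Python) =====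
-- _PATTERN_KEY = {
--     'V1': 'visual', 'V2': 'visual', 'VAC': 'visual',
--     'PFC': 'prefrontal', 'FEF': 'prefrontal',
--     'HC': 'hippocampus', 'PHC': 'hippocampus',
--     'AMYG': 'amygdala',
--     'TM': 'thalamus',
--     'M1': 'motor', 'PMC': 'motor',
-- }
-- _KEYS = ['visual', 'prefrontal', 'hippocampus', 'amygdala', 'thalamus', 'motor']
--
--
-- def classify_regions(labels):
--     # Substring index: instead of testing each pattern against each label,
--     # slide a window over each uppercased label and look the window up in a
--     # pattern -> category hash table; collect the hit categories in a set.
--     groups = {k: [] for k in _KEYS}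
--     for i, l in enumerate(labels):
--         u = l.upper()
--         hit = set()
--         for length in (2, 3, 4):
--             for j in range(len(u) - length + 1):
--                 k = _PATTERN_KEY.get(u[j:j + length])
--                 if k is not None:
--                     hit.add(k)
--         for k in _KEYS:
--             if k in hit:
--                 groups[k].append(i)
--     return groups
-- ===== Notes on version B (the rewrite author's own statement) =====
-- stated objective: alternative
-- what changed: B replaces A's six per-category scans that test every pattern against every label with a substring index: one pass over the labels that slides a 2/3/4-character window over each uppercased label, looks the window up in a precomputed pattern-to-category hash table, collects hit categories in a set, and appends the index to each hit category of a pre-created six-key dict.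
import Mathlib
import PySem

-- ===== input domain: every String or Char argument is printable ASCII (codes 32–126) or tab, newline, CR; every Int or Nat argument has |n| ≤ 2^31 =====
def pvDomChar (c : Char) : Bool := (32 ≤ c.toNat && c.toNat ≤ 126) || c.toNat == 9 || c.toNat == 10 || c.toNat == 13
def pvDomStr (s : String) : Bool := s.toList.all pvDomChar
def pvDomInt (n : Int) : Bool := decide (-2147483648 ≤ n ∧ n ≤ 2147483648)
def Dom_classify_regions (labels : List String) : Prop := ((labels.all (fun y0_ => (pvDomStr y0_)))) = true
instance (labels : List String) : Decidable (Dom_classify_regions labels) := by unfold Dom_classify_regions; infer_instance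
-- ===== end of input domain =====

-- B classifies by a substring index — a sliding 2/3/4-char window over each uppercased label,
-- looked up in a pattern→category table, hits collected in a set — instead of A's six
-- per-category scans testing every pattern against every label; return values proved equal.

-- ===== PORT A =====
def classify_regions (labels : List String) : List (String × List Int) :=
  (([ ("visual", ["V1", "V2", "VAC"]),
      ("prefrontal", ["PFC", "FEF"]),
      ("hippocampus", ["HC", "PHC"]),
      ("amygdala", ["AMYG"]),
      ("thalamus", ["TM"]),
      ("motor", ["M1", "PMC"]) ] : List (String × List String)).foldl
    (fun groups kp =>
      groups.insert kp.1
        (((PySem.List.enumerate labels).filter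
            (fun il => kp.2.any (fun p => PySem.Str.isIn p (PySem.Str.upper il.2)))).map (·.1)))
    (PySem.Dict.mk [])).items

-- ===== PORT B =====
def pvPatternKey : PySem.Dict String String :=
  PySem.Dict.mk
    [("V1", "visual"), ("V2", "visual"), ("VAC", "visual"),
     ("PFC", "prefrontal"), ("FEF", "prefrontal"),
     ("HC", "hippocampus"), ("PHC", "hippocampus"),
     ("AMYG", "amygdala"),
     ("TM", "thalamus"),
     ("M1", "motor"), ("PMC", "motor")]

def pvKeys : List String :=
  ["visual", "prefrontal", "hippocampus", "amygdala", "thalamus", "motor"]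

-- the per-label hit set: slide windows of length 2, 3, 4 over u, look each up in the table
def pvHits (u : String) : PySem.Set String :=
  ([2, 3, 4] : List Int).foldl
    (fun hit len =>
      (PySem.List.pyRange 0 (PySem.Str.len u - len + 1) 1).foldl
        (fun hit j =>
          match pvPatternKey.get? (PySem.Str.slice u (some j) (some (j + len))) with
          | some k => PySem.Set.add hit k
          | none => hit)
        hit)
    PySem.Set.empty

def classify_regions_alt (labels : List String) : List (String × List Int) :=
  ((PySem.List.enumerate labels).foldl
    (fun groups il =>
      let hit := pvHits (PySem.Str.upper il.2)
      pvKeys.foldl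
        (fun g k =>
          if PySem.Set.contains hit k then g.modify k [] (fun xs => xs ++ [il.1]) else g)
        groups)
    (pvKeys.foldl (fun g k => g.insert k []) (PySem.Dict.mk []))).items

-- ===== PRECONDITION & SPEC =====
def Spec_classify_regions (labels : List String) (out : List (String × List Int)) : Prop := out = classify_regions_alt labels
instance (labels : List String) (out : List (String × List Int)) : Decidable (Spec_classify_regions labels out) := by unfold Spec_classify_regions; infer_instance

-- ===== CLAIM (what is proved, stated in full; the proofs are below) =====
def Claim_equal_classify_regions : Prop := ∀ (labels : List String), Dom_classify_regions labels → Spec_classify_regions labels (classify_regions labels)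

-- ===== LEMMAS AND PROOFS =====

-- does pattern list `pats` match label `l` (the membership test A uses)
def pvCond (pats : List String) (l : String) : Bool :=
  pats.any (fun p => PySem.Str.isIn p (PySem.Str.upper l))

-- matching indices of one category among an enumerated chunk
def pvSel (pats : List String) (es : List (Int × String)) : List Int :=
  (es.filter (fun il => pvCond pats il.2)).map (·.1)

-- the table lookup succeeds exactly on the table's pattern/key pairs
lemma pv_get (s v : String) :
    pvPatternKey.get? s = some v ↔ (s, v) ∈ pvPatternKey.items := by
  by_cases h1 : s = "V1"; · subst h1; simp [pvPatternKey, PySem.Dict.get?, eq_comm]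
  by_cases h2 : s = "V2"; · subst h2; simp [pvPatternKey, PySem.Dict.get?, eq_comm]
  by_cases h3 : s = "VAC"; · subst h3; simp [pvPatternKey, PySem.Dict.get?, eq_comm]
  by_cases h4 : s = "PFC"; · subst h4; simp [pvPatternKey, PySem.Dict.get?, eq_comm]
  by_cases h5 : s = "FEF"; · subst h5; simp [pvPatternKey, PySem.Dict.get?, eq_comm]
  by_cases h6 : s = "HC"; · subst h6; simp [pvPatternKey, PySem.Dict.get?, eq_comm]
  by_cases h7 : s = "PHC"; · subst h7; simp [pvPatternKey, PySem.Dict.get?, eq_comm]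
  by_cases h8 : s = "AMYG"; · subst h8; simp [pvPatternKey, PySem.Dict.get?, eq_comm]
  by_cases h9 : s = "TM"; · subst h9; simp [pvPatternKey, PySem.Dict.get?, eq_comm]
  by_cases h10 : s = "M1"; · subst h10; simp [pvPatternKey, PySem.Dict.get?, eq_comm]
  by_cases h11 : s = "PMC"; · subst h11; simp [pvPatternKey, PySem.Dict.get?, eq_comm]
  have e : ∀ a : String, a ≠ s → (a == s) = false := fun a ha => beq_eq_false_iff_ne.mpr ha
  simp [pvPatternKey, PySem.Dict.get?, List.find?, e _ (Ne.symm h1), e _ (Ne.symm h2),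
    e _ (Ne.symm h3), e _ (Ne.symm h4), e _ (Ne.symm h5), e _ (Ne.symm h6), e _ (Ne.symm h7),
    e _ (Ne.symm h8), e _ (Ne.symm h9), e _ (Ne.symm h10), e _ (Ne.symm h11),
    h1, h2, h3, h4, h5, h6, h7, h8, h9, h10, h11]

-- membership in the window-scan fold that adds looked-up keys to the set
lemma pv_mem_foldl_add (f : Int → Option String) (js : List Int)
    (s0 : PySem.Set String) (k : String) :
    (k ∈ js.foldl
        (fun hit j =>
          match f j with
          | some k' => PySem.Set.add hit k'
          | none => hit)
        s0) ↔
      k ∈ s0 ∨ ∃ j ∈ js, f j = some k := by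
  induction js generalizing s0 with
  | nil => simp
  | cons j t ih =>
      simp only [List.foldl_cons]
      rw [ih]
      cases hf : f j with
      | none =>
          simp only [List.mem_cons]
          constructor
          · rintro (h | ⟨x, hx, hfx⟩)
            · exact Or.inl h
            · exact Or.inr ⟨x, Or.inr hx, hfx⟩
          · rintro (h | ⟨x, rfl | hx, hfx⟩)
            · exact Or.inl h
            · rw [hf] at hfx; cases hfx
            · exact Or.inr ⟨x, hx, hfx⟩
      | some k' =>
          simp only [PySem.Set.mem_add, List.mem_cons]
          constructor
          · rintro ((h | rfl) | ⟨x, hx, hfx⟩)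
            · exact Or.inl h
            · exact Or.inr ⟨j, Or.inl rfl, hf⟩
            · exact Or.inr ⟨x, Or.inr hx, hfx⟩
          · rintro (h | ⟨x, rfl | hx, hfx⟩)
            · exact Or.inl (Or.inl h)
            · rw [hf] at hfx
              injection hfx with hkk
              exact Or.inl (Or.inr hkk.symm)
            · exact Or.inr ⟨x, hx, hfx⟩

-- one window family: some window of length `len` looks up to key k
def pvWin (u : String) (len : Int) (k : String) : Prop :=
  ∃ j ∈ PySem.List.pyRange 0 (PySem.Str.len u - len + 1) 1,
    pvPatternKey.get? (PySem.Str.slice u (some j) (some (j + len))) = some k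

lemma pv_mem_hits (u : String) (k : String) :
    k ∈ pvHits u ↔ pvWin u 2 k ∨ pvWin u 3 k ∨ pvWin u 4 k := by
  unfold pvHits pvWin
  simp only [List.foldl_cons, List.foldl_nil]
  rw [pv_mem_foldl_add, pv_mem_foldl_add, pv_mem_foldl_add]
  simp [PySem.Set.empty]
  exact or_assoc

-- any window of u is a substring of u
lemma pv_slice_isIn (u : String) (j len : Int) (hj : 0 ≤ j) (hl : 0 ≤ len) :
    PySem.Str.isIn (PySem.Str.slice u (some j) (some (j + len))) u = true := by
  rw [PySem.Str.isIn_iff_infix, PySem.Str.toList_slice, PySem.Chars.slice_eq_listSlice]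
  rw [PySem.List.slice_toNat u.toList hj (by omega)]
  exact ((List.take_prefix _ _).isInfix).trans ((List.drop_suffix _ _).isInfix)

-- a substring occurrence yields a window of exactly its length
lemma pv_exists_window (u p : String) (len : Int)
    (hlen : len = (p.toList.length : Int)) (h : p.toList <:+: u.toList) :
    ∃ j ∈ PySem.List.pyRange 0 (PySem.Str.len u - len + 1) 1,
      PySem.Str.slice u (some j) (some (j + len)) = p := by
  obtain ⟨s, t, hst⟩ := h
  refine ⟨(s.length : Int), ?_, ?_⟩
  · rw [PySem.List.mem_pyRange_one]
    have hu : u.toList.length = s.length + p.toList.length + t.length := by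
      rw [← hst]; simp only [List.length_append]
    constructor
    · positivity
    · rw [PySem.Str.len_eq, hlen, hu]
      push_cast
      omega
  · apply String.toList_injective
    rw [PySem.Str.toList_slice, PySem.Chars.slice_eq_listSlice, hlen]
    rw [show ((s.length : Int)) = ((s.length : Nat) : Int) from rfl]
    rw [PySem.List.slice_natCast_add u.toList s.length p.toList.length]
    rw [← hst, List.append_assoc, List.drop_left, List.take_left]

-- the hit set holds key k exactly when one of k's patterns occurs in u
lemma pv_key (u : String) (k : String) (pats : List String)
    (hget : ∀ s : String, pvPatternKey.get? s = some k ↔ s ∈ pats)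
    (hlen : ∀ p ∈ pats,
      (p.toList.length : Int) = 2 ∨ (p.toList.length : Int) = 3 ∨ (p.toList.length : Int) = 4) :
    PySem.Set.contains (pvHits u) k = pats.any (fun p => PySem.Str.isIn p u) := by
  apply Bool.coe_iff_coe.mp
  rw [show (PySem.Set.contains (pvHits u) k = true) ↔ k ∈ pvHits u by
        simp [PySem.Set.contains]]
  rw [pv_mem_hits, List.any_eq_true]
  constructor
  · rintro (⟨j, hj, hg⟩ | ⟨j, hj, hg⟩ | ⟨j, hj, hg⟩)
    · exact ⟨_, (hget _).mp hg,
        pv_slice_isIn u j 2 (PySem.List.mem_pyRange_one.mp hj).1 (by norm_num)⟩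
    · exact ⟨_, (hget _).mp hg,
        pv_slice_isIn u j 3 (PySem.List.mem_pyRange_one.mp hj).1 (by norm_num)⟩
    · exact ⟨_, (hget _).mp hg,
        pv_slice_isIn u j 4 (PySem.List.mem_pyRange_one.mp hj).1 (by norm_num)⟩
  · rintro ⟨p, hp, hin⟩
    have hinf := (PySem.Str.isIn_iff_infix p u).mp hin
    have hg : pvPatternKey.get? p = some k := (hget p).mpr hp
    rcases hlen p hp with hl | hl | hl
    · exact Or.inl (by
        obtain ⟨j, hj, he⟩ := pv_exists_window u p 2 hl.symm hinf
        exact ⟨j, hj, by rw [he]; exact hg⟩)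
    · exact Or.inr (Or.inl (by
        obtain ⟨j, hj, he⟩ := pv_exists_window u p 3 hl.symm hinf
        exact ⟨j, hj, by rw [he]; exact hg⟩))
    · exact Or.inr (Or.inr (by
        obtain ⟨j, hj, he⟩ := pv_exists_window u p 4 hl.symm hinf
        exact ⟨j, hj, by rw [he]; exact hg⟩))

-- the six instances, stated against A's test pvCond
lemma pv_hit1 (l : String) :
    PySem.Set.contains (pvHits (PySem.Str.upper l)) "visual" = pvCond ["V1", "V2", "VAC"] l := by
  rw [pvCond, pv_key _ _ ["V1", "V2", "VAC"] (fun s => by rw [pv_get]; simp [pvPatternKey])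
    (by decide)]

lemma pv_hit2 (l : String) :
    PySem.Set.contains (pvHits (PySem.Str.upper l)) "prefrontal" = pvCond ["PFC", "FEF"] l := by
  rw [pvCond, pv_key _ _ ["PFC", "FEF"] (fun s => by rw [pv_get]; simp [pvPatternKey])
    (by decide)]

lemma pv_hit3 (l : String) :
    PySem.Set.contains (pvHits (PySem.Str.upper l)) "hippocampus" = pvCond ["HC", "PHC"] l := by
  rw [pvCond, pv_key _ _ ["HC", "PHC"] (fun s => by rw [pv_get]; simp [pvPatternKey])
    (by decide)]

lemma pv_hit4 (l : String) :
    PySem.Set.contains (pvHits (PySem.Str.upper l)) "amygdala" = pvCond ["AMYG"] l := by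
  rw [pvCond, pv_key _ _ ["AMYG"] (fun s => by rw [pv_get]; simp [pvPatternKey])
    (by decide)]

lemma pv_hit5 (l : String) :
    PySem.Set.contains (pvHits (PySem.Str.upper l)) "thalamus" = pvCond ["TM"] l := by
  rw [pvCond, pv_key _ _ ["TM"] (fun s => by rw [pv_get]; simp [pvPatternKey])
    (by decide)]

lemma pv_hit6 (l : String) :
    PySem.Set.contains (pvHits (PySem.Str.upper l)) "motor" = pvCond ["M1", "PMC"] l := by
  rw [pvCond, pv_key _ _ ["M1", "PMC"] (fun s => by rw [pv_get]; simp [pvPatternKey])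
    (by decide)]

-- guarded modify of each of the six fixed keys, evaluated on the canonical 6-entry dict
lemma pv_mod1 (c : Bool) (f : List Int → List Int) (a1 a2 a3 a4 a5 a6 : List Int) :
    (if c then (PySem.Dict.mk [("visual", a1), ("prefrontal", a2), ("hippocampus", a3),
        ("amygdala", a4), ("thalamus", a5), ("motor", a6)]).modify "visual" [] f
     else PySem.Dict.mk [("visual", a1), ("prefrontal", a2), ("hippocampus", a3),
        ("amygdala", a4), ("thalamus", a5), ("motor", a6)]) =
    PySem.Dict.mk [("visual", if c then f a1 else a1), ("prefrontal", a2), ("hippocampus", a3),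
        ("amygdala", a4), ("thalamus", a5), ("motor", a6)] := by
  cases c <;> simp [PySem.Dict.modify, PySem.Dict.insert, PySem.Dict.contains,
    PySem.Dict.getD, PySem.Dict.get?]

lemma pv_mod2 (c : Bool) (f : List Int → List Int) (a1 a2 a3 a4 a5 a6 : List Int) :
    (if c then (PySem.Dict.mk [("visual", a1), ("prefrontal", a2), ("hippocampus", a3),
        ("amygdala", a4), ("thalamus", a5), ("motor", a6)]).modify "prefrontal" [] f
     else PySem.Dict.mk [("visual", a1), ("prefrontal", a2), ("hippocampus", a3),
        ("amygdala", a4), ("thalamus", a5), ("motor", a6)]) =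
    PySem.Dict.mk [("visual", a1), ("prefrontal", if c then f a2 else a2), ("hippocampus", a3),
        ("amygdala", a4), ("thalamus", a5), ("motor", a6)] := by
  cases c <;> simp [PySem.Dict.modify, PySem.Dict.insert, PySem.Dict.contains,
    PySem.Dict.getD, PySem.Dict.get?]

lemma pv_mod3 (c : Bool) (f : List Int → List Int) (a1 a2 a3 a4 a5 a6 : List Int) :
    (if c then (PySem.Dict.mk [("visual", a1), ("prefrontal", a2), ("hippocampus", a3),
        ("amygdala", a4), ("thalamus", a5), ("motor", a6)]).modify "hippocampus" [] f
     else PySem.Dict.mk [("visual", a1), ("prefrontal", a2), ("hippocampus", a3),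
        ("amygdala", a4), ("thalamus", a5), ("motor", a6)]) =
    PySem.Dict.mk [("visual", a1), ("prefrontal", a2), ("hippocampus", if c then f a3 else a3),
        ("amygdala", a4), ("thalamus", a5), ("motor", a6)] := by
  cases c <;> simp [PySem.Dict.modify, PySem.Dict.insert, PySem.Dict.contains,
    PySem.Dict.getD, PySem.Dict.get?]

lemma pv_mod4 (c : Bool) (f : List Int → List Int) (a1 a2 a3 a4 a5 a6 : List Int) :
    (if c then (PySem.Dict.mk [("visual", a1), ("prefrontal", a2), ("hippocampus", a3),
        ("amygdala", a4), ("thalamus", a5), ("motor", a6)]).modify "amygdala" [] f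
     else PySem.Dict.mk [("visual", a1), ("prefrontal", a2), ("hippocampus", a3),
        ("amygdala", a4), ("thalamus", a5), ("motor", a6)]) =
    PySem.Dict.mk [("visual", a1), ("prefrontal", a2), ("hippocampus", a3),
        ("amygdala", if c then f a4 else a4), ("thalamus", a5), ("motor", a6)] := by
  cases c <;> simp [PySem.Dict.modify, PySem.Dict.insert, PySem.Dict.contains,
    PySem.Dict.getD, PySem.Dict.get?]

lemma pv_mod5 (c : Bool) (f : List Int → List Int) (a1 a2 a3 a4 a5 a6 : List Int) :
    (if c then (PySem.Dict.mk [("visual", a1), ("prefrontal", a2), ("hippocampus", a3),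
        ("amygdala", a4), ("thalamus", a5), ("motor", a6)]).modify "thalamus" [] f
     else PySem.Dict.mk [("visual", a1), ("prefrontal", a2), ("hippocampus", a3),
        ("amygdala", a4), ("thalamus", a5), ("motor", a6)]) =
    PySem.Dict.mk [("visual", a1), ("prefrontal", a2), ("hippocampus", a3),
        ("amygdala", a4), ("thalamus", if c then f a5 else a5), ("motor", a6)] := by
  cases c <;> simp [PySem.Dict.modify, PySem.Dict.insert, PySem.Dict.contains,
    PySem.Dict.getD, PySem.Dict.get?]

lemma pv_mod6 (c : Bool) (f : List Int → List Int) (a1 a2 a3 a4 a5 a6 : List Int) :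
    (if c then (PySem.Dict.mk [("visual", a1), ("prefrontal", a2), ("hippocampus", a3),
        ("amygdala", a4), ("thalamus", a5), ("motor", a6)]).modify "motor" [] f
     else PySem.Dict.mk [("visual", a1), ("prefrontal", a2), ("hippocampus", a3),
        ("amygdala", a4), ("thalamus", a5), ("motor", a6)]) =
    PySem.Dict.mk [("visual", a1), ("prefrontal", a2), ("hippocampus", a3),
        ("amygdala", a4), ("thalamus", a5), ("motor", if c then f a6 else a6)] := by
  cases c <;> simp [PySem.Dict.modify, PySem.Dict.insert, PySem.Dict.contains,
    PySem.Dict.getD, PySem.Dict.get?]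

-- a guarded singleton-append as an unconditional append
lemma pv_ite_append (c : Bool) (a : List Int) (i : Int) :
    (if c then a ++ [i] else a) = a ++ (if c then [i] else []) := by
  cases c <;> simp

-- one step of B's outer fold on the canonical 6-entry dict
lemma pv_step (i : Int) (l : String) (a1 a2 a3 a4 a5 a6 : List Int) :
    pvKeys.foldl
      (fun g k =>
        if PySem.Set.contains (pvHits (PySem.Str.upper l)) k then
          g.modify k [] (fun xs => xs ++ [i])
        else g)
      (PySem.Dict.mk [("visual", a1), ("prefrontal", a2), ("hippocampus", a3),
                      ("amygdala", a4), ("thalamus", a5), ("motor", a6)]) =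
    PySem.Dict.mk
      [("visual", a1 ++ if pvCond ["V1", "V2", "VAC"] l then [i] else []),
       ("prefrontal", a2 ++ if pvCond ["PFC", "FEF"] l then [i] else []),
       ("hippocampus", a3 ++ if pvCond ["HC", "PHC"] l then [i] else []),
       ("amygdala", a4 ++ if pvCond ["AMYG"] l then [i] else []),
       ("thalamus", a5 ++ if pvCond ["TM"] l then [i] else []),
       ("motor", a6 ++ if pvCond ["M1", "PMC"] l then [i] else [])] := by
  simp only [pvKeys, List.foldl]
  rw [pv_hit1, pv_hit2, pv_hit3, pv_hit4, pv_hit5, pv_hit6]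
  rw [pv_mod1, pv_mod2, pv_mod3, pv_mod4, pv_mod5, pv_mod6]
  simp only [pv_ite_append]

-- B's outer fold from the canonical dict appends each category's selection
lemma pv_fold (es : List (Int × String)) (a1 a2 a3 a4 a5 a6 : List Int) :
    es.foldl
      (fun groups il =>
        let hit := pvHits (PySem.Str.upper il.2)
        pvKeys.foldl
          (fun g k =>
            if PySem.Set.contains hit k then g.modify k [] (fun xs => xs ++ [il.1]) else g)
          groups)
      (PySem.Dict.mk [("visual", a1), ("prefrontal", a2), ("hippocampus", a3),
                      ("amygdala", a4), ("thalamus", a5), ("motor", a6)]) =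
    PySem.Dict.mk
      [("visual", a1 ++ pvSel ["V1", "V2", "VAC"] es),
       ("prefrontal", a2 ++ pvSel ["PFC", "FEF"] es),
       ("hippocampus", a3 ++ pvSel ["HC", "PHC"] es),
       ("amygdala", a4 ++ pvSel ["AMYG"] es),
       ("thalamus", a5 ++ pvSel ["TM"] es),
       ("motor", a6 ++ pvSel ["M1", "PMC"] es)] := by
  induction es generalizing a1 a2 a3 a4 a5 a6 with
  | nil => simp [pvSel]
  | cons e t ih =>
      obtain ⟨i, l⟩ := e
      simp only [List.foldl_cons]
      rw [pv_step, ih]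
      simp only [pvSel, List.filter_cons]
      have h : ∀ (pats : List String),
          (a : List Int) → a ++ ((if pvCond pats l then [i] else []) ++
              ((t.filter (fun il => pvCond pats il.2)).map (·.1))) =
            a ++ ((if pvCond pats l = true then (i, l) :: t.filter (fun il => pvCond pats il.2)
                   else t.filter (fun il => pvCond pats il.2)).map (·.1)) := by
        intro pats a
        by_cases hc : pvCond pats l <;> simp [hc]
      simp only [List.append_assoc]
      rw [h, h, h, h, h, h]

-- B's initial dict (six keys, empty lists) evaluated
lemma pv_init :
    (pvKeys.foldl (fun g k => g.insert k []) (PySem.Dict.mk []) :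
        PySem.Dict String (List Int)) =
    PySem.Dict.mk [("visual", []), ("prefrontal", []), ("hippocampus", []),
                   ("amygdala", []), ("thalamus", []), ("motor", [])] := by
  simp [pvKeys, PySem.Dict.insert, PySem.Dict.contains]

-- A's result written out category by category
lemma pv_A (labels : List String) :
    classify_regions labels =
    [("visual", pvSel ["V1", "V2", "VAC"] (PySem.List.enumerate labels)),
     ("prefrontal", pvSel ["PFC", "FEF"] (PySem.List.enumerate labels)),
     ("hippocampus", pvSel ["HC", "PHC"] (PySem.List.enumerate labels)),
     ("amygdala", pvSel ["AMYG"] (PySem.List.enumerate labels)),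
     ("thalamus", pvSel ["TM"] (PySem.List.enumerate labels)),
     ("motor", pvSel ["M1", "PMC"] (PySem.List.enumerate labels))] := by
  simp [classify_regions, PySem.Dict.insert, PySem.Dict.contains, pvSel, pvCond]

-- ===== VERDICT (by name: the statement is the Claim_ definition above) =====
theorem classify_regions_spec : Claim_equal_classify_regions := by
  intro labels _
  show classify_regions labels = classify_regions_alt labels
  rw [pv_A]
  unfold classify_regions_alt
  rw [pv_init, pv_fold]
  simp
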